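-- pv_equiv track=rewrite | github.com/lina-zulfikar/POM_python_selenium | metrics/calculate_noh.py | count_noh
-- ===== SOURCE A (Python) =====
-- def count_noh(inheritance_map):
--     noh_count = 0
--     subclass_map = {}
--
--     # Membangun peta subclass untuk setiap kelas
--     for cls, bases in inheritance_map.items():
--         for base in bases:
--             if base in subclass_map:
--                 subclass_map[base].append(cls)
--             else:
--                 subclass_map[base] = [cls]
--
--     # Menghitung jumlah akar hierarki
--     for cls, bases in inheritance_map.items():
--         # Kelas dianggap sebagai akar hierarki jika:
--         # - Tidak memiliki superclass (bases kosong)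
--         # - Memiliki setidaknya satu subclass dalam subclass_map
--         if not bases and cls in subclass_map:
--             noh_count += 1
--
--     return noh_count
-- ===== SOURCE B (Python) =====
-- def count_noh(inheritance_map):
--     return sum(
--         1
--         for cls, bases in inheritance_map.items()
--         if not bases and any(cls in bs for bs in inheritance_map.values())
--     )
-- ===== Notes on version B (the rewrite author's own statement) =====
-- stated objective: simpler
-- what changed: Drops A's dict-of-subclass-lists index entirely: B is a single generator-sum that, for each base-less class, brute-force scans the bases lists with any(), so no auxiliary structure is built or maintained.
import Mathlib
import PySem

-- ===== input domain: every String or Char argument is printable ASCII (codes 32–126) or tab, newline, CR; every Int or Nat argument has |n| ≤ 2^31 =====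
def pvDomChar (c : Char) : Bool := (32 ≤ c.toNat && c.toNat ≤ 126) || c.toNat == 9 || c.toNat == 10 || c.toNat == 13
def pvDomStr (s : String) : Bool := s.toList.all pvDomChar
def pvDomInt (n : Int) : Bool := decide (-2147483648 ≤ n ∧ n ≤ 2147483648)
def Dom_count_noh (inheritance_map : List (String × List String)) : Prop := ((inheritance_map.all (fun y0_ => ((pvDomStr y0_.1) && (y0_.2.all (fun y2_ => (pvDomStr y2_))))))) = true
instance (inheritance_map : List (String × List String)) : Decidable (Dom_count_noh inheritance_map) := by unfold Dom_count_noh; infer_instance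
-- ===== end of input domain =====

-- B drops A's dict-of-subclass-lists index: it is a single sum that brute-force scans
-- the bases lists with any() for each base-less class; same result, no auxiliary structure.


-- ===== PORT A =====
def count_noh (inheritance_map : List (String × List String)) : Int :=
  -- noh_count = 0; subclass_map = {}
  let subclass_map : PySem.Dict String (List String) :=
    inheritance_map.foldl (fun d p =>
      p.2.foldl (fun d base =>
        if d.contains base then d.modify base [] (fun l => l ++ [p.1])
        else d.insert base [p.1]) d) PySem.Dict.empty
  inheritance_map.foldl (fun noh_count p =>
    if p.2 = [] ∧ subclass_map.contains p.1 = true then noh_count + 1 else noh_count) 0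

-- ===== PORT B =====
-- sum(1 for cls, bases in items if not bases and any(cls in bs for bs in values))
def count_noh_alt (inheritance_map : List (String × List String)) : Int :=
  inheritance_map.foldl (fun acc p =>
    if p.2 = [] ∧ inheritance_map.any (fun q => q.2.contains p.1) = true
    then acc + 1 else acc) 0

-- ===== PRECONDITION & SPEC =====
def Spec_count_noh (inheritance_map : List (String × List String)) (out : Int) : Prop := out = count_noh_alt inheritance_map
instance (inheritance_map : List (String × List String)) (out : Int) : Decidable (Spec_count_noh inheritance_map out) := by unfold Spec_count_noh; infer_instance

-- ===== CLAIM =====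
def Claim_equal_count_noh : Prop := ∀ (inheritance_map : List (String × List String)), Dom_count_noh inheritance_map → Spec_count_noh inheritance_map (count_noh inheritance_map)

-- ===== LEMMAS AND PROOFS =====

-- inner loop of A's first pass: afterwards a key is present iff it was before or occurs in bases
theorem contains_inner_loop (bases : List String) (cls : String)
    (d : PySem.Dict String (List String)) (b : String) :
    ((bases.foldl (fun d base =>
        if d.contains base then d.modify base [] (fun l => l ++ [cls])
        else d.insert base [cls]) d).contains b)
      = (d.contains b || bases.contains b) := by
  induction bases generalizing d with
  | nil => simp
  | cons x xs ih =>
    simp only [List.foldl_cons]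
    by_cases hx : d.contains x
    · simp only [if_pos hx, ih, PySem.Dict.contains_modify]
      by_cases hbx : b = x <;> simp [hbx, hx, Bool.or_assoc]
    · simp only [if_neg hx, ih, PySem.Dict.contains_insert]
      by_cases hbx : b = x <;> simp [hbx, hx, Bool.or_assoc]

-- subclass_map contains b iff b occurs among the bases of some entry
theorem contains_subclass_map (m : List (String × List String)) (b : String) :
    ((m.foldl (fun d p =>
        p.2.foldl (fun d base =>
          if d.contains base then d.modify base [] (fun l => l ++ [p.1])
          else d.insert base [p.1]) d) PySem.Dict.empty).contains b)
      = m.any (fun q => q.2.contains b) := by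
  suffices h : ∀ d : PySem.Dict String (List String),
      ((m.foldl (fun d p =>
          p.2.foldl (fun d base =>
            if d.contains base then d.modify base [] (fun l => l ++ [p.1])
            else d.insert base [p.1]) d) d).contains b)
        = (d.contains b || m.any (fun q => q.2.contains b)) by
    simpa using h PySem.Dict.empty
  induction m with
  | nil => simp
  | cons p ps ih =>
    intro d
    simp only [List.foldl_cons, ih, contains_inner_loop, List.any_cons, Bool.or_assoc]

-- ===== VERDICT =====
theorem count_noh_spec : Claim_equal_count_noh := by
  intro m _
  unfold Spec_count_noh count_noh count_noh_alt
  simp only [contains_subclass_map]
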